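-- pv_equiv track=rewrite | github.com/153079019shariq/ATPG_Sequential | Gates.py | XOR_XNOR_Obser
-- ===== SOURCE A (Python) =====
-- import copy
--
-- def XOR_XNOR_Obser(list_predecessorCC1,list_predecessorCC0,edgeCO):
-- 	Observability_list=[]
-- 	for i in range(len(list_predecessorCC1)):
-- 		list_temp1 =copy.deepcopy(list_predecessorCC1)
-- 		list_temp2 =copy.deepcopy(list_predecessorCC0)
-- 		del list_temp1[i]
-- 		del list_temp2[i]
-- 		sum1=min(sum(list_temp1),sum(list_temp2)) + edgeCO +1
-- 		Observability_list.append(sum1)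
-- 	return Observability_list
-- ===== SOURCE B (Python) =====
-- def XOR_XNOR_Obser(list_predecessorCC1, list_predecessorCC0, edgeCO):
--     total1 = sum(list_predecessorCC1)
--     total0 = sum(list_predecessorCC0)
--     return [min(total1 - a, total0 - b) + edgeCO + 1
--             for a, b in zip(list_predecessorCC1, list_predecessorCC0)]
-- ===== Notes on version B (the rewrite author's own statement) =====
-- stated objective: faster
-- what changed: Instead of deep-copying both lists and re-summing them for every index (quadratic), B computes each total once and uses total - element per position in a single pass.
import Mathlib
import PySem

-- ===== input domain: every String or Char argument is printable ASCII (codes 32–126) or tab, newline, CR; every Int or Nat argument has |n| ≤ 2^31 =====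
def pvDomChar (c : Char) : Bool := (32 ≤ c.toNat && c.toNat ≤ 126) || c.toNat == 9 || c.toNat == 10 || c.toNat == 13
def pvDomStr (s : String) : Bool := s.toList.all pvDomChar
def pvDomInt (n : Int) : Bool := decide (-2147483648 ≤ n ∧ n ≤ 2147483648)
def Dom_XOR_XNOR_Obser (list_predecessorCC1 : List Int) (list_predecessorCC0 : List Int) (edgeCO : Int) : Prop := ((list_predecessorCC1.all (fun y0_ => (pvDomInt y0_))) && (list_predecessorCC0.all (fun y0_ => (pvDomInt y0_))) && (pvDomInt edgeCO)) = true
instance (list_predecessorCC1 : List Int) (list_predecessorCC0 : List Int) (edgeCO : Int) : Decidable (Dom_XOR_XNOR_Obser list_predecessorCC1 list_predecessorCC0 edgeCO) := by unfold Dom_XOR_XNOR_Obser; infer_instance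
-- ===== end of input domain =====

-- B computes each list's total once and uses total - element per index (O(n)) instead of
-- A's per-index deep copies and re-summing (O(n^2)).

-- ===== PORT A =====
-- for i in range(len(list1)): copy both lists, delete index i from each, append min of sums + edgeCO + 1
def XOR_XNOR_Obser (list_predecessorCC1 : List Int) (list_predecessorCC0 : List Int) (edgeCO : Int) : List Int :=
  (List.range list_predecessorCC1.length).foldl
    (fun acc i =>
      let list_temp1 := list_predecessorCC1.eraseIdx i
      let list_temp2 := list_predecessorCC0.eraseIdx i
      acc ++ [min list_temp1.sum list_temp2.sum + edgeCO + 1])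
    []

-- ===== PORT B =====
def XOR_XNOR_Obser_alt (list_predecessorCC1 : List Int) (list_predecessorCC0 : List Int) (edgeCO : Int) : List Int :=
  let total1 := list_predecessorCC1.sum
  let total0 := list_predecessorCC0.sum
  (list_predecessorCC1.zip list_predecessorCC0).map
    (fun p => min (total1 - p.1) (total0 - p.2) + edgeCO + 1)

-- ===== PRECONDITION & SPEC =====
-- A raises IndexError (del list_temp2[i]) exactly when list_predecessorCC0 is shorter than list_predecessorCC1.
def Pre_XOR_XNOR_Obser (list_predecessorCC1 : List Int) (list_predecessorCC0 : List Int) (edgeCO : Int) : Prop :=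
  list_predecessorCC1.length ≤ list_predecessorCC0.length
instance (list_predecessorCC1 : List Int) (list_predecessorCC0 : List Int) (edgeCO : Int) : Decidable (Pre_XOR_XNOR_Obser list_predecessorCC1 list_predecessorCC0 edgeCO) := by unfold Pre_XOR_XNOR_Obser; infer_instance
def pvWitness_XOR_XNOR_Obser : List Int × List Int × Int := ([3, 1, 4], [2, 7, 1], 5)

def Spec_XOR_XNOR_Obser (list_predecessorCC1 : List Int) (list_predecessorCC0 : List Int) (edgeCO : Int) (out : List Int) : Prop := out = XOR_XNOR_Obser_alt list_predecessorCC1 list_predecessorCC0 edgeCO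
instance (list_predecessorCC1 : List Int) (list_predecessorCC0 : List Int) (edgeCO : Int) (out : List Int) : Decidable (Spec_XOR_XNOR_Obser list_predecessorCC1 list_predecessorCC0 edgeCO out) := by unfold Spec_XOR_XNOR_Obser; infer_instance

-- ===== CLAIM (what is proved, stated in full; the proofs are below) =====
def Claim_equal_XOR_XNOR_Obser : Prop := ∀ (list_predecessorCC1 : List Int) (list_predecessorCC0 : List Int) (edgeCO : Int), Dom_XOR_XNOR_Obser list_predecessorCC1 list_predecessorCC0 edgeCO → Pre_XOR_XNOR_Obser list_predecessorCC1 list_predecessorCC0 edgeCO → Spec_XOR_XNOR_Obser list_predecessorCC1 list_predecessorCC0 edgeCO (XOR_XNOR_Obser list_predecessorCC1 list_predecessorCC0 edgeCO)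
-- ===== LEMMAS AND PROOFS =====

-- A's foldl appending one element per step is (acc ++) the map over the same list.
theorem pv_foldl_append_map {α : Type} (f : Nat → α) :
    ∀ (l : List Nat) (acc : List α),
      l.foldl (fun a i => a ++ [f i]) acc = acc ++ l.map f := by
  intro l
  induction l with
  | nil => intro acc; simp
  | cons x xs ih => intro acc; simp [List.foldl, ih]

-- sum of the list with index i erased = total sum minus the element there
theorem pv_sum_eraseIdx :
    ∀ (l : List Int) (i : Nat) (h : i < l.length),
      (l.eraseIdx i).sum = l.sum - l[i] := by
  intro l
  induction l with
  | nil => intro i h; simp at h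
  | cons x xs ih =>
    intro i h
    cases i with
    | zero => simp [List.eraseIdx]
    | succ j =>
      have hj : j < xs.length := by simpa using h
      simp [List.eraseIdx, ih j hj]
      ring

-- ===== VERDICT (by name: the statement is the Claim_ definition above) =====
theorem XOR_XNOR_Obser_spec : Claim_equal_XOR_XNOR_Obser := by
  unfold Claim_equal_XOR_XNOR_Obser
  intro l1 l0 e _ hpre
  unfold Spec_XOR_XNOR_Obser XOR_XNOR_Obser XOR_XNOR_Obser_alt
  rw [pv_foldl_append_map]
  simp only [List.nil_append]
  apply List.ext_getElem
  · simp [Pre_XOR_XNOR_Obser] at hpre ⊢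
    omega
  · intro i h1 h2
    have hi1 : i < l1.length := by simpa using h1
    have hi0 : i < l0.length := lt_of_lt_of_le hi1 hpre
    simp [pv_sum_eraseIdx l1 i hi1, pv_sum_eraseIdx l0 i hi0]
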